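-- pv_equiv track=rewrite | github.com/mjkim1019/MIDER | mider/tools/static_analysis/sql_syntax_checker.py | _find_stmt_line
-- ===== SOURCE A (Python) =====
-- def _find_stmt_line(stmt_text: str, full_content: str) -> int:
--     """SQL 문의 시작 라인 번호를 찾는다."""
--     first_line = stmt_text.split("\n", 1)[0].strip()
--     if not first_line:
--         return 1
--
--     lines = full_content.split("\n")
--     for i, line in enumerate(lines):
--         if first_line in line:
--             return i + 1
--     return 1
-- ===== SOURCE B (Python) =====
-- def _find_stmt_line(stmt_text: str, full_content: str) -> int:
--     """SQL 문의 시작 라인 번호를 찾는다."""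
--     first_line = stmt_text.split("\n", 1)[0].strip()
--     if not first_line:
--         return 1
--     pos = full_content.find(first_line)
--     if pos == -1:
--         return 1
--     return full_content[:pos].count("\n") + 1
-- ===== Notes on version B (the rewrite author's own statement) =====
-- stated objective: idiomatic
-- what changed: Instead of splitting full_content into lines and scanning them with an enumerate loop, B locates the first occurrence with full_content.find(first_line) and derives the line number by counting the newlines before that position; no line list and no Python-level loop.
import Mathlib
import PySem

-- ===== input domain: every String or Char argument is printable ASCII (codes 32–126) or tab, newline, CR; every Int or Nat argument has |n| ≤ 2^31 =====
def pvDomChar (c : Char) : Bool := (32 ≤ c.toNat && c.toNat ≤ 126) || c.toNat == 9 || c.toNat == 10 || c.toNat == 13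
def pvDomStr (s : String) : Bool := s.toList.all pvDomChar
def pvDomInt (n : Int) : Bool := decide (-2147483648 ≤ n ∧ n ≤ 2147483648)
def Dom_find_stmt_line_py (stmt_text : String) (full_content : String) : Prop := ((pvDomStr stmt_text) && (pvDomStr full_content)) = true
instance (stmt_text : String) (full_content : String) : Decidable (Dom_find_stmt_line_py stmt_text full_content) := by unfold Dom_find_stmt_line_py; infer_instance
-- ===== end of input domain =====

-- B replaces A's split-into-lines + enumerate scan by a single find() plus a newline count
-- before the match position (objective: idiomatic; same return value, no side effects).

-- ===== PORT A =====
-- the 'for i, line in enumerate(lines): if first_line in line: return i + 1' loop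
def pvLoopA (first_line : List Char) : List (Int × List Char) → Int
  | [] => 1
  | (i, line) :: rest => if PySem.Chars.isIn first_line line then i + 1 else pvLoopA first_line rest

def find_stmt_line_py (stmt_text : String) (full_content : String) : Int :=
  -- stmt_text.split("\n", 1)[0]: split with a nonempty separator always returns a
  -- nonempty list, so the [0] never raises; headD [] is exact here.
  let first_line := PySem.Chars.strip ((PySem.Chars.splitOnMax stmt_text.toList ['\n'] 1).headD [])
  if first_line.isEmpty then 1
  else
    let lines := PySem.Chars.splitOn full_content.toList ['\n']
    pvLoopA first_line (PySem.List.enumerate lines 0)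

-- ===== PORT B =====
def find_stmt_line_py_alt (stmt_text : String) (full_content : String) : Int :=
  let first_line := PySem.Chars.strip ((PySem.Chars.splitOnMax stmt_text.toList ['\n'] 1).headD [])
  if first_line.isEmpty then 1
  else
    let pos := PySem.Chars.find full_content.toList first_line
    if pos = -1 then 1
    else (PySem.Chars.count (PySem.List.slice full_content.toList none (some pos)) ['\n'] : Int) + 1

-- ===== PRECONDITION & SPEC =====
def Spec_find_stmt_line_py (stmt_text : String) (full_content : String) (out : Int) : Prop := out = find_stmt_line_py_alt stmt_text full_content
instance (stmt_text : String) (full_content : String) (out : Int) : Decidable (Spec_find_stmt_line_py stmt_text full_content out) := by unfold Spec_find_stmt_line_py; infer_instance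

-- ===== CLAIM (what is proved, stated in full; the proofs are below) =====
def Claim_equal_find_stmt_line_py : Prop := ∀ (stmt_text : String) (full_content : String), Dom_find_stmt_line_py stmt_text full_content → Spec_find_stmt_line_py stmt_text full_content (find_stmt_line_py stmt_text full_content)

-- ===== LEMMAS AND PROOFS =====

-- proof-side model of full_content.split("\n")
def pvLines : List Char → List (List Char)
  | [] => [[]]
  | c :: rest =>
    if c = '\n' then [] :: pvLines rest
    else
      match pvLines rest with
      | [] => [[c]]
      | x :: xs => (c :: x) :: xs

def pvConsHead (pre : List Char) : List (List Char) → List (List Char)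
  | [] => [pre]
  | x :: xs => (pre ++ x) :: xs

theorem pvLines_ne_nil (l : List Char) : pvLines l ≠ [] := by
  cases l with
  | nil => simp [pvLines]
  | cons c rest =>
    simp only [pvLines]
    split
    · simp
    · split <;> simp

theorem pvConsHead_nil_eq (xs : List (List Char)) (h : xs ≠ []) : pvConsHead [] xs = xs := by
  cases xs with
  | nil => exact absurd rfl h
  | cons x xs => simp [pvConsHead]

theorem pvSplitOn_go_eq (fuel : Nat) (l cur : List Char) (acc : List (List Char))
    (h : l.length < fuel) :
    PySem.Chars.splitOn.go ['\n'] fuel l cur acc = acc.reverse ++ pvConsHead cur.reverse (pvLines l) := by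
  induction fuel generalizing l cur acc with
  | zero => omega
  | succ f ih =>
    cases l with
    | nil => rw [PySem.Chars.splitOn.go]; simp [pvLines, pvConsHead]; omega
    | cons c rest =>
      rw [PySem.Chars.splitOn.go]
      by_cases hc : c = '\n'
      · subst hc
        have hpre : ['\n'].isPrefixOf ('\n' :: rest) = true := by simp [List.isPrefixOf]
        simp only [hpre, if_true, List.length_cons] at *
        rw [show List.drop ([].length + 1) ('\n' :: rest) = rest by simp]
        rw [ih rest [] (cur.reverse :: acc) (by simpa using h)]
        rw [List.reverse_nil, pvConsHead_nil_eq _ (pvLines_ne_nil rest)]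
        simp [pvLines, pvConsHead]
      · have hpre : ['\n'].isPrefixOf (c :: rest) = false := by
          simp [List.isPrefixOf]; exact fun hh => absurd hh.symm hc
        simp only [hpre, Bool.false_eq_true, if_false]
        rw [ih rest (c :: cur) acc (by simp at h ⊢; omega)]
        obtain ⟨x, xs, hx⟩ : ∃ x xs, pvLines rest = x :: xs := by
          cases hh : pvLines rest with
          | nil => exact absurd hh (pvLines_ne_nil rest)
          | cons x xs => exact ⟨x, xs, rfl⟩
        simp [pvLines, hc, hx, pvConsHead]

theorem pvSplitOn_eq (c : List Char) : PySem.Chars.splitOn c ['\n'] = pvLines c := by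
  rw [PySem.Chars.splitOn, pvSplitOn_go_eq (c.length + 1) c [] [] (by omega)]
  simp [pvConsHead_nil_eq _ (pvLines_ne_nil c)]

theorem pvLines_no_nl (c : List Char) (h : '\n' ∉ c) : pvLines c = [c] := by
  induction c with
  | nil => simp [pvLines]
  | cons x rest ih =>
    have hx : x ≠ '\n' := fun hh => h (by simp [hh])
    rw [pvLines, if_neg hx, ih (fun hh => h (by simp [hh]))]

theorem pvLines_split (a r : List Char) (h : '\n' ∉ a) :
    pvLines (a ++ '\n' :: r) = a :: pvLines r := by
  induction a with
  | nil => simp [pvLines]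
  | cons x a' ih =>
    have hx : x ≠ '\n' := fun hh => h (by simp [hh])
    rw [List.cons_append, pvLines, if_neg hx, ih (fun hh => h (by simp [hh]))]

-- splitOnMax(s, "\n", 1): the first piece is everything before the first newline
theorem pvSplitOnMax_go_zero (fuel : Nat) (l cur : List Char) (acc : List (List Char)) :
    PySem.Chars.splitOnMax.go ['\n'] fuel 0 l cur acc = ((cur.reverse ++ l) :: acc).reverse := by
  cases fuel with
  | zero => rw [PySem.Chars.splitOnMax.go]
  | succ f =>
    cases l with
    | nil => rw [PySem.Chars.splitOnMax.go]; simp; omega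
    | cons c rest => rw [PySem.Chars.splitOnMax.go]; simp

theorem pvSplitOnMax_go_one (fuel : Nat) (l cur : List Char) (acc : List (List Char))
    (h : l.length < fuel) :
    PySem.Chars.splitOnMax.go ['\n'] fuel 1 l cur acc =
      acc.reverse ++ (cur.reverse ++ l.takeWhile (· ≠ '\n')) ::
        (if '\n' ∈ l then [(l.dropWhile (· ≠ '\n')).tail] else []) := by
  induction fuel generalizing l cur acc with
  | zero => omega
  | succ f ih =>
    cases l with
    | nil => rw [PySem.Chars.splitOnMax.go]; simp; omega
    | cons c rest =>
      rw [PySem.Chars.splitOnMax.go]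
      by_cases hc : c = '\n'
      · subst hc
        have hpre : ['\n'].isPrefixOf ('\n' :: rest) = true := by simp [List.isPrefixOf]
        simp only [hpre, if_true, show (1 : Nat) ≠ 0 by omega, List.length_singleton]
        rw [show (1 : Nat) - 1 = 0 from rfl,
          show List.drop 1 ('\n' :: rest) = rest by simp, pvSplitOnMax_go_zero]
        simp [List.takeWhile, List.dropWhile]
      · have hpre : ['\n'].isPrefixOf (c :: rest) = false := by
          simp [List.isPrefixOf]; exact fun hh => absurd hh.symm hc
        simp only [hpre, Bool.false_eq_true, if_false, if_neg (show (1 : Nat) ≠ 0 by omega)]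
        rw [ih rest (c :: cur) acc (by simp at h ⊢; omega)]
        simp [List.takeWhile, List.dropWhile, hc, Ne.symm hc]

theorem pvFirstPiece (s : List Char) :
    (PySem.Chars.splitOnMax s ['\n'] 1).headD [] = s.takeWhile (· ≠ '\n') := by
  rw [PySem.Chars.splitOnMax, if_neg (by omega)]
  rw [show ((1 : Int).toNat) = 1 from rfl, pvSplitOnMax_go_one (s.length + 1) s [] [] (by omega)]
  split <;> simp

theorem pvStrip_mem {c : Char} {l : List Char} (h : c ∈ PySem.Chars.strip l) : c ∈ l := by
  rw [PySem.Chars.strip, PySem.Chars.rstrip, PySem.Chars.lstrip] at h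
  rw [List.mem_reverse] at h
  have h2 := (List.dropWhile_sublist _).mem h
  rw [List.mem_reverse] at h2
  exact (List.dropWhile_sublist _).mem h2

theorem pvFirstLine_no_nl (s : List Char) :
    '\n' ∉ PySem.Chars.strip ((PySem.Chars.splitOnMax s ['\n'] 1).headD []) := by
  intro h
  have := pvStrip_mem h
  rw [pvFirstPiece] at this
  have := List.mem_takeWhile_imp this
  simp at this

-- str.count with a single-character needle is the character count
theorem pvCount_go (fuel : Nat) (l : List Char) (acc : Nat) (h : l.length ≤ fuel) :
    PySem.Chars.count.go ['\n'] fuel l acc = acc + l.count '\n' := by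
  induction fuel generalizing l acc with
  | zero =>
    have : l = [] := by cases l <;> simp_all
    subst this
    rw [PySem.Chars.count.go]; simp
  | succ f ih =>
    cases l with
    | nil => rw [PySem.Chars.count.go]; simp; omega
    | cons c rest =>
      rw [PySem.Chars.count.go]
      by_cases hc : c = '\n'
      · subst hc
        have hpre : ['\n'].isPrefixOf ('\n' :: rest) = true := by simp [List.isPrefixOf]
        simp only [hpre, if_true, List.length_singleton]
        rw [show List.drop 1 ('\n' :: rest) = rest by simp, ih rest (acc + 1) (by simp at h ⊢; omega)]
        simp; omega
      · have hpre : ['\n'].isPrefixOf (c :: rest) = false := by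
          simp [List.isPrefixOf]; exact fun hh => absurd hh.symm hc
        simp only [hpre, Bool.false_eq_true, if_false]
        rw [ih rest acc (by simp at h ⊢; omega)]
        simp [hc]

theorem pvCount_nl (l : List Char) : PySem.Chars.count l ['\n'] = l.count '\n' := by
  rw [PySem.Chars.count, if_neg (by simp), pvCount_go l.length l 0 (le_refl _)]
  simp

-- find is characterised by its first occurrence
theorem pvFind_eq_of_first (c w : List Char) (p : Nat) (hp : w <+: c.drop p)
    (hmin : ∀ i < p, ¬ w <+: c.drop i) : PySem.Chars.find c w = p := by
  have hinf : PySem.Chars.isIn w c = true := (PySem.Chars.exists_prefix_drop_iff_isIn w c).mp ⟨p, hp⟩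
  have hnn : 0 ≤ PySem.Chars.find c w :=
    (PySem.Chars.find_nonneg_iff c w).mpr ((PySem.Chars.isIn_iff_infix w c).mp hinf)
  obtain ⟨h1, h2⟩ := PySem.Chars.find_spec hnn
  have heq : (PySem.Chars.find c w).toNat = p := by
    rcases lt_trichotomy (PySem.Chars.find c w).toNat p with hlt | he | hgt
    · exact absurd h1 (hmin _ hlt)
    · exact he
    · exact absurd hp (h2 _ hgt)
  omega

-- occurrence transfer across a '\n' split (w nonempty, no '\n' in w)
theorem pvOccL {w a : List Char} (r : List Char) {i : Nat} (hi : i ≤ a.length)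
    (h : w <+: a.drop i) : w <+: (a ++ '\n' :: r).drop i := by
  rw [List.drop_append_of_le_length hi]
  exact h.trans (List.prefix_append _ _)

theorem pvOccL' {w a : List Char} (r : List Char) (hw : '\n' ∉ w) {i : Nat} (hi : i ≤ a.length)
    (h : w <+: (a ++ '\n' :: r).drop i) : w <+: a.drop i := by
  rw [List.drop_append_of_le_length hi] at h
  have hlen : w.length ≤ (a.drop i).length := by
    by_contra hlt
    push Not at hlt
    have hw2 : w[(a.drop i).length]'hlt = (a.drop i ++ '\n' :: r)[(a.drop i).length]'(by simp) :=
      List.IsPrefix.getElem h hlt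
    rw [List.getElem_append_right (le_refl _)] at hw2
    simp at hw2
    exact hw (hw2 ▸ List.getElem_mem (show a.length - i < w.length by simpa using hlt))
  have he : w = (a.drop i ++ '\n' :: r).take w.length := List.prefix_iff_eq_take.mp h
  rw [List.take_append_of_le_length hlen] at he
  exact he ▸ List.take_prefix _ _

theorem pvOccR {a : List Char} (r : List Char) (j : Nat) :
    (a ++ '\n' :: r).drop (a.length + 1 + j) = r.drop j := by
  rw [show a.length + 1 + j = a.length + (1 + j) by omega, List.drop_append,
    List.drop_eq_nil_of_le (by omega), show a.length + (1 + j) - a.length = j + 1 by omega]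
  simp

theorem pvInfix_split {w a r : List Char} (hw : w ≠ []) (hnl : '\n' ∉ w) :
    w <:+: (a ++ '\n' :: r) ↔ (w <:+: a ∨ w <:+: r) := by
  have hiff : ∀ s : List Char, w <:+: s ↔ ∃ j, w <+: s.drop j := fun s => by
    rw [← PySem.Chars.isIn_iff_infix, ← PySem.Chars.exists_prefix_drop_iff_isIn]
  constructor
  · intro h
    obtain ⟨i, hpi⟩ := (hiff _).mp h
    by_cases hia : i ≤ a.length
    · exact Or.inl ((hiff a).mpr ⟨i, pvOccL' r hnl hia hpi⟩)
    · refine Or.inr ((hiff r).mpr ⟨i - a.length - 1, ?_⟩)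
      rwa [← pvOccR r (i - a.length - 1), show a.length + 1 + (i - a.length - 1) = i by omega]
  · rintro (h | h)
    · obtain ⟨i, hpi⟩ := (hiff a).mp h
      by_cases hia : i ≤ a.length
      · exact (hiff (a ++ '\n' :: r)).mpr ⟨i, pvOccL r hia hpi⟩
      · exfalso
        rw [List.drop_eq_nil_of_le (by omega)] at hpi
        exact hw (List.prefix_nil.mp hpi)
    · obtain ⟨j, hpj⟩ := (hiff r).mp h
      exact (hiff (a ++ '\n' :: r)).mpr ⟨a.length + 1 + j, by rwa [pvOccR]⟩

theorem pvExists_split {c : List Char} (h : '\n' ∈ c) :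
    ∃ a r, c = a ++ '\n' :: r ∧ '\n' ∉ a := by
  induction c with
  | nil => simp at h
  | cons x rest ih =>
    by_cases hx : x = '\n'
    · exact ⟨[], rest, by simp [hx], by simp⟩
    · have hr : '\n' ∈ rest := by
        rcases List.mem_cons.mp h with hh | hh
        · exact absurd hh.symm hx
        · exact hh
      obtain ⟨a, r, heq, hna⟩ := ih hr
      exact ⟨x :: a, r, by simp [heq], by simp [hna, Ne.symm hx]⟩

-- the enumerate loop, shifted by one line
theorem pvLoopA_shift (w : List Char) (xs : List (List Char)) (s : Int) :
    pvLoopA w (PySem.List.enumerate xs (s + 1)) =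
      if xs.any (PySem.Chars.isIn w) then pvLoopA w (PySem.List.enumerate xs s) + 1 else 1 := by
  induction xs generalizing s with
  | nil => simp [PySem.List.enumerate, pvLoopA]
  | cons x xs ih =>
    rw [PySem.List.enumerate_cons, PySem.List.enumerate_cons]
    by_cases hx : PySem.Chars.isIn w x = true
    · simp [pvLoopA, hx]
    · simp only [pvLoopA, hx, Bool.false_eq_true, if_false, List.any_cons, Bool.false_or,
        ih (s + 1)]

theorem pvAny_lines_iff (w : List Char) (hw : w ≠ []) (hnl : '\n' ∉ w) (c : List Char) :
    (pvLines c).any (PySem.Chars.isIn w) = true ↔ w <:+: c := by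
  by_cases h : '\n' ∈ c
  · obtain ⟨a, r, heq, ha⟩ := pvExists_split h
    have hlt : r.length < c.length := by rw [heq]; simp; omega
    rw [heq, pvLines_split a r ha]
    have ihr := pvAny_lines_iff w hw hnl r
    simp only [List.any_cons, Bool.or_eq_true, ihr, PySem.Chars.isIn_iff_infix]
    exact (pvInfix_split hw hnl).symm
  · rw [pvLines_no_nl c h]
    simp [PySem.Chars.isIn_iff_infix]
termination_by c.length
decreasing_by exact hlt

-- the heart: A's line scan equals B's find-and-count on any content
theorem pvMain (w : List Char) (hw : w ≠ []) (hnl : '\n' ∉ w) (c : List Char) :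
    pvLoopA w (PySem.List.enumerate (pvLines c) 0) =
      (if PySem.Chars.find c w = -1 then 1
       else (PySem.Chars.count (PySem.List.slice c none (some (PySem.Chars.find c w))) ['\n'] : Int) + 1) := by
  have hiff : ∀ s : List Char, w <:+: s ↔ ∃ j, w <+: s.drop j := fun s => by
    rw [← PySem.Chars.isIn_iff_infix, ← PySem.Chars.exists_prefix_drop_iff_isIn]
  by_cases h : '\n' ∈ c
  · obtain ⟨a, r, heq, ha⟩ := pvExists_split h
    have hlt : r.length < c.length := by rw [heq]; simp; omega
    rw [heq, pvLines_split a r ha, PySem.List.enumerate_cons]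
    by_cases hwa : w <:+: a
    · -- found in the first line: both sides are 1
      have hfa0 : 0 ≤ PySem.Chars.find a w := (PySem.Chars.find_nonneg_iff a w).mpr hwa
      obtain ⟨hocc, hmin⟩ := PySem.Chars.find_spec hfa0
      have hle : (PySem.Chars.find a w).toNat ≤ a.length := by
        have := PySem.Chars.find_le_length a w
        omega
      have hfc : PySem.Chars.find (a ++ '\n' :: r) w = (PySem.Chars.find a w).toNat := by
        refine pvFind_eq_of_first _ _ _ (pvOccL r hle hocc) (fun i hi hoi => ?_)
        exact hmin i hi (pvOccL' r hnl (by omega) hoi)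
      have hisin : PySem.Chars.isIn w a = true := (PySem.Chars.isIn_iff_infix w a).mpr hwa
      rw [pvLoopA, if_pos hisin, hfc, if_neg (by omega)]
      rw [PySem.List.slice_to _ (by omega), pvCount_nl]
      have htake : ((a ++ '\n' :: r).take ((PySem.Chars.find a w).toNat : Int).toNat)
          = a.take (PySem.Chars.find a w).toNat := by
        rw [Int.toNat_natCast, List.take_append_of_le_length hle]
      rw [htake, List.count_eq_zero.mpr (fun hm => ha (List.mem_of_mem_take hm))]
      simp
    · have hisin : PySem.Chars.isIn w a = false := (PySem.Chars.isIn_eq_false_iff w a).mpr hwa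
      rw [pvLoopA, if_neg (by simp [hisin]), show (0 : Int) + 1 = 0 + 1 from rfl,
        pvLoopA_shift w (pvLines r) 0]
      by_cases hwr : w <:+: r
      · -- found in a later line: peel the first line and its newline off both sides
        have hany : (pvLines r).any (PySem.Chars.isIn w) = true :=
          (pvAny_lines_iff w hw hnl r).mpr hwr
        rw [if_pos hany]
        have ihr := pvMain w hw hnl r
        have hfr0 : 0 ≤ PySem.Chars.find r w := (PySem.Chars.find_nonneg_iff r w).mpr hwr
        obtain ⟨hocc, hmin⟩ := PySem.Chars.find_spec hfr0
        have hfc : PySem.Chars.find (a ++ '\n' :: r) w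
            = ((a.length + 1 + (PySem.Chars.find r w).toNat : Nat) : Int) := by
          refine pvFind_eq_of_first _ _ _ (by rw [pvOccR]; exact hocc) (fun i hi hoi => ?_)
          by_cases hia : i ≤ a.length
          · exact hwa ((hiff a).mpr ⟨i, pvOccL' r hnl hia hoi⟩)
          · refine hmin (i - a.length - 1) (by omega) ?_
            rwa [← pvOccR r (i - a.length - 1),
              show a.length + 1 + (i - a.length - 1) = i by omega]
        have hfrne : PySem.Chars.find r w ≠ -1 := by omega
        rw [ihr, if_neg hfrne, hfc, if_neg (by omega)]
        rw [PySem.List.slice_to _ (by omega), PySem.List.slice_to _ (by omega), pvCount_nl,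
          pvCount_nl]
        have htake : ((a ++ '\n' :: r).take ((a.length + 1 + (PySem.Chars.find r w).toNat : Nat) : Int).toNat)
            = a ++ '\n' :: r.take (PySem.Chars.find r w).toNat := by
          rw [Int.toNat_natCast, show a.length + 1 + (PySem.Chars.find r w).toNat
            = a.length + (1 + (PySem.Chars.find r w).toNat) by omega, List.take_append]
          simp [List.take_succ_cons, Nat.add_comm 1]
        rw [htake]
        have hcnta : a.count '\n' = 0 := List.count_eq_zero.mpr ha
        rw [List.count_append, List.count_cons_self, hcnta]
        push_cast
        ring
      · -- not found at all: both sides are 1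
        have hany : (pvLines r).any (PySem.Chars.isIn w) = false := by
          rw [← Bool.not_eq_true, pvAny_lines_iff w hw hnl r]; exact hwr
        rw [hany, if_neg (by simp)]
        have hnc : ¬ w <:+: (a ++ '\n' :: r) := by
          rw [pvInfix_split hw hnl]; rintro (hh | hh) <;> [exact hwa hh; exact hwr hh]
        rw [if_pos ((PySem.Chars.find_eq_neg_one_iff _ w).mpr hnc)]
  · -- no newline in the content: one single line, both sides are 1
    rw [pvLines_no_nl c h, PySem.List.enumerate_cons]
    by_cases hwc : PySem.Chars.isIn w c = true
    · have hf0 : 0 ≤ PySem.Chars.find c w :=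
        (PySem.Chars.find_nonneg_iff c w).mpr ((PySem.Chars.isIn_iff_infix w c).mp hwc)
      rw [pvLoopA, if_pos hwc, if_neg (by omega), PySem.List.slice_to _ hf0, pvCount_nl]
      rw [List.count_eq_zero.mpr (fun hm => h (List.mem_of_mem_take hm))]
      simp
    · rw [pvLoopA, if_neg hwc, if_pos]
      · rfl
      · rw [PySem.Chars.find_eq_neg_one_iff]
        exact fun hh => hwc ((PySem.Chars.isIn_iff_infix w c).mpr hh)
termination_by c.length
decreasing_by exact hlt

-- ===== VERDICT (by name: the statement is the Claim_ definition above) =====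
theorem find_stmt_line_py_spec : Claim_equal_find_stmt_line_py := by
  intro stmt_text full_content _
  unfold Spec_find_stmt_line_py find_stmt_line_py find_stmt_line_py_alt
  set w := PySem.Chars.strip ((PySem.Chars.splitOnMax stmt_text.toList ['\n'] 1).headD []) with hwdef
  by_cases hemp : w.isEmpty
  · simp [hemp]
  · simp only [hemp, if_false, Bool.false_eq_true]
    rw [pvSplitOn_eq]
    exact pvMain w (by simpa using hemp) (hwdef ▸ pvFirstLine_no_nl stmt_text.toList) full_content.toList
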